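-- pv_equiv track=rewrite | github.com/linshibo1994/happy8 | src/happy8_app.py | create_comparison_display
-- ===== SOURCE A (Python) =====
-- from typing import List, Dict, Any
--
-- def create_comparison_display(predicted: List[int], actual: List[int]) -> str:
--     """创建对比显示HTML"""
--     hit_numbers = set(predicted) & set(actual)
--
--     html_predicted = "<div><strong>预测号码:</strong><br>"
--     for i, num in enumerate(predicted):
--         if i > 0 and i % 10 == 0:
--             html_predicted += "<br>"
--
--         css_class = "hit-number prediction-number" if num in hit_numbers else "miss-number prediction-number"
--         html_predicted += f'<span class="{css_class}">{num:02d}</span>'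
--     html_predicted += "</div>"
--
--     html_actual = "<div style='margin-top: 1rem;'><strong>开奖号码:</strong><br>"
--     for i, num in enumerate(actual):
--         if i > 0 and i % 10 == 0:
--             html_actual += "<br>"
--         html_actual += f'<span class="actual-number prediction-number">{num:02d}</span>'
--     html_actual += "</div>"
--
--     return html_predicted + html_actual
-- ===== SOURCE B (Python) =====
-- def create_comparison_display(predicted, actual):
--     """创建对比显示HTML (chunked rebuild: rows of 10 joined with <br>)"""
--     hit_numbers = set(predicted) & set(actual)
--
--     def block(header, nums, cls):
--         spans = [f'<span class="{cls(n)}">{n:02d}</span>' for n in nums]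
--         rows = [''.join(spans[k:k + 10]) for k in range(0, len(spans), 10)]
--         return header + '<br>'.join(rows) + '</div>'
--
--     pred_html = block(
--         '<div><strong>预测号码:</strong><br>', predicted,
--         lambda n: 'hit-number prediction-number' if n in hit_numbers
--         else 'miss-number prediction-number')
--     actual_html = block(
--         "<div style='margin-top: 1rem;'><strong>开奖号码:</strong><br>", actual,
--         lambda n: 'actual-number prediction-number')
--     return pred_html + actual_html
-- ===== Notes on version B (the rewrite author's own statement) =====
-- stated objective: simpler
-- what changed: Replaces A's two per-element loops with a running index and an i%10 break test by one reusable block helper that slices the rendered spans into rows of 10 and joins rows with '<br>'.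
import Mathlib
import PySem

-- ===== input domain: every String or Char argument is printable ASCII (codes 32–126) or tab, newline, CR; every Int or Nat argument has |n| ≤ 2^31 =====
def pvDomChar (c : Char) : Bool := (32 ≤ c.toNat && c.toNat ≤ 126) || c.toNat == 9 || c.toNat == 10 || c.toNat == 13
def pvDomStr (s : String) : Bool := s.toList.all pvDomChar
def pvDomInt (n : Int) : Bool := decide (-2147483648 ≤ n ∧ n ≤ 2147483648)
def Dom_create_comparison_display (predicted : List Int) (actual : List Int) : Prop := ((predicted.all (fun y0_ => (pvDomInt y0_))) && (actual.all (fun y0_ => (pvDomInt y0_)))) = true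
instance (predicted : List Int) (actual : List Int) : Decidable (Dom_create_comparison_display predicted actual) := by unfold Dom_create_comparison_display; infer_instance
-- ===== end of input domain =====

-- B rebuilds the HTML by slicing the spans into rows of 10 joined with "<br>" via one
-- reusable block helper, instead of A's per-index i%10 break test: simpler decomposition.

-- shared f-string primitive: f'{n:02d}' (width-2 zero pad of str(n))
def pvFmt02 (n : Int) : List Char :=
  let s := PySem.Int.toChars n
  if s.length < 2 then '0' :: s else s

-- shared f-string primitive: f'<span class="{cls}">{n:02d}</span>'
def pvSpan (cls : List Char) (n : Int) : List Char :=
  "<span class=\"".toList ++ cls ++ "\">".toList ++ pvFmt02 n ++ "</span>".toList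

-- ===== PORT A =====
-- A's loop: running index i, "<br>" inserted when i > 0 and i % 10 == 0
def pvALoop (spanf : Int → List Char) (i : Nat) (xs : List Int) (acc : List Char) : List Char :=
  match xs with
  | [] => acc
  | n :: rest =>
      pvALoop spanf (i + 1) rest
        (acc ++ (if 0 < i ∧ i % 10 = 0 then "<br>".toList else []) ++ spanf n)

def create_comparison_display (predicted : List Int) (actual : List Int) : String :=
  let hit_numbers : PySem.Set Int :=
    PySem.Set.inter (PySem.Set.ofList predicted) (PySem.Set.ofList actual)
  let html_predicted :=
    pvALoop
      (fun n => pvSpan (if PySem.Set.contains hit_numbers n then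
          "hit-number prediction-number".toList else "miss-number prediction-number".toList) n)
      0 predicted "<div><strong>预测号码:</strong><br>".toList ++ "</div>".toList
  let html_actual :=
    pvALoop (fun n => pvSpan "actual-number prediction-number".toList n)
      0 actual "<div style='margin-top: 1rem;'><strong>开奖号码:</strong><br>".toList ++ "</div>".toList
  String.ofList (html_predicted ++ html_actual)

-- ===== PORT B =====
-- B's slicing spans[k:k+10] for k in range(0, len, 10)
def pvChunks10 {α : Type} : List α → List (List α)
  | [] => []
  | x :: r => ((x :: r).take 10) :: pvChunks10 ((x :: r).drop 10)
termination_by xs => xs.length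
decreasing_by simp

def pvBlock (header : List Char) (nums : List Int) (cls : Int → List Char) : List Char :=
  let spans := nums.map (fun n => pvSpan (cls n) n)
  let rows := (pvChunks10 spans).map List.flatten
  header ++ List.intercalate "<br>".toList rows ++ "</div>".toList

def create_comparison_display_alt (predicted : List Int) (actual : List Int) : String :=
  let hit_numbers : PySem.Set Int :=
    PySem.Set.inter (PySem.Set.ofList predicted) (PySem.Set.ofList actual)
  let pred_html :=
    pvBlock "<div><strong>预测号码:</strong><br>".toList predicted
      (fun n => if PySem.Set.contains hit_numbers n then
          "hit-number prediction-number".toList else "miss-number prediction-number".toList)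
  let actual_html :=
    pvBlock "<div style='margin-top: 1rem;'><strong>开奖号码:</strong><br>".toList actual
      (fun _ => "actual-number prediction-number".toList)
  String.ofList (pred_html ++ actual_html)

-- ===== PRECONDITION & SPEC =====
def Spec_create_comparison_display (predicted : List Int) (actual : List Int) (out : String) : Prop := out = create_comparison_display_alt predicted actual
instance (predicted : List Int) (actual : List Int) (out : String) : Decidable (Spec_create_comparison_display predicted actual out) := by unfold Spec_create_comparison_display; infer_instance

-- ===== CLAIM (what is proved, stated in full; the proofs are below) =====
def Claim_equal_create_comparison_display : Prop := ∀ (predicted : List Int) (actual : List Int), Dom_create_comparison_display predicted actual → Spec_create_comparison_display predicted actual (create_comparison_display predicted actual)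

-- ===== LEMMAS AND PROOFS =====

theorem pvChunks10_nil {α : Type} : pvChunks10 ([] : List α) = [] := by rw [pvChunks10]

theorem pvALoop_append (f : Int → List Char) (ys zs : List Int) :
    ∀ (i : Nat) (acc : List Char),
      pvALoop f i (ys ++ zs) acc = pvALoop f (i + ys.length) zs (pvALoop f i ys acc) := by
  induction ys with
  | nil => intro i acc; simp [pvALoop]
  | cons y t ih =>
      intro i acc
      simp only [List.cons_append, pvALoop, List.length_cons, ih]
      ring_nf

theorem pvALoop_noBreak (f : Int → List Char) :
    ∀ (ys : List Int) (i : Nat) (acc : List Char),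
      (∀ k, k < ys.length → (i + k) % 10 ≠ 0) →
      pvALoop f i ys acc = acc ++ (ys.map f).flatten := by
  intro ys
  induction ys with
  | nil => intro i acc _; simp [pvALoop]
  | cons y t ih =>
      intro i acc h
      have h0 : i % 10 ≠ 0 := by simpa using h 0 (by simp)
      simp only [pvALoop, h0, and_false]
      rw [ih (i + 1) _ (fun k hk => by
        have := h (k + 1) (by simpa using Nat.succ_lt_succ hk)
        omega)]
      simp [List.append_assoc]

theorem pvALoop_chunkRun (f : Int → List Char) (t : List Int) (ht : t.length ≤ 10)
    (i : Nat) (acc : List Char) (hi : i % 10 = 0) :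
    pvALoop f i t acc =
      acc ++ (if 0 < i ∧ t ≠ [] then "<br>".toList else []) ++ (t.map f).flatten := by
  cases t with
  | nil => simp [pvALoop]
  | cons n rest =>
      simp only [pvALoop, hi]
      rw [pvALoop_noBreak f rest (i + 1) _ (fun k hk => by
        have hr : rest.length < 10 := by simpa using ht
        have : (i + 1 + k) % 10 = (1 + k) % 10 := by
          conv_lhs => rw [show i + 1 + k = i + (1 + k) by ring, Nat.add_mod, hi]
          simp
        rw [this, Nat.mod_eq_of_lt (by omega)]
        omega)]
      by_cases h0 : 0 < i
      · simp [h0, List.append_assoc]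
      · simp [h0, List.append_assoc]

theorem pvChunks10_small {α : Type} (l : List α) (h0 : l ≠ []) (h : l.length ≤ 10) :
    pvChunks10 l = [l] := by
  cases l with
  | nil => simp at h0
  | cons x r =>
      rw [pvChunks10]
      have hd : (x :: r).drop 10 = [] := by
        apply List.drop_eq_nil_of_le; simpa using h
      rw [hd, List.take_of_length_le (by simpa using h), pvChunks10_nil]

theorem pvChunks10_big {α : Type} (l : List α) (h : 10 < l.length) :
    pvChunks10 l = l.take 10 :: pvChunks10 (l.drop 10) := by
  cases l with
  | nil => simp at h
  | cons x r => rw [pvChunks10]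

theorem pvChunks10_ne_nil {α : Type} (l : List α) (h0 : l ≠ []) : pvChunks10 l ≠ [] := by
  cases l with
  | nil => simp at h0
  | cons x r => rw [pvChunks10]; simp

theorem intercalate_cons_of_ne_nil {α : Type} (sep a : List α) (rest : List (List α))
    (h : rest ≠ []) :
    List.intercalate sep (a :: rest) = a ++ sep ++ List.intercalate sep rest := by
  cases rest with
  | nil => simp at h
  | cons b t => simp [List.intercalate, List.intersperse]

theorem pvALoop_chunks (f : Int → List Char) :
    ∀ (n : Nat) (xs : List Int), xs.length ≤ n → ∀ (i : Nat) (acc : List Char), i % 10 = 0 →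
      pvALoop f i xs acc =
        acc ++ (if 0 < i ∧ xs ≠ [] then "<br>".toList else []) ++
          List.intercalate "<br>".toList ((pvChunks10 (xs.map f)).map List.flatten) := by
  intro n
  induction n with
  | zero =>
      intro xs hxs i acc hi
      have : xs = [] := List.eq_nil_of_length_eq_zero (Nat.le_zero.mp hxs)
      subst this; simp [pvALoop, pvChunks10_nil, List.intercalate]
  | succ m ih =>
      intro xs hxs i acc hi
      by_cases hsmall : xs.length ≤ 10
      · cases hxe : xs with
        | nil => subst hxe; simp [pvALoop, pvChunks10_nil, List.intercalate]
        | cons x r =>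
            rw [← hxe]
            rw [pvALoop_chunkRun f xs hsmall i acc hi]
            rw [pvChunks10_small (xs.map f) (by simp [hxe]) (by simpa using hsmall)]
            simp [List.intercalate]
      · rw [not_le] at hsmall
        have hxs10 : xs = xs.take 10 ++ xs.drop 10 := (List.take_append_drop 10 xs).symm
        conv_lhs => rw [hxs10]
        rw [pvALoop_append]
        rw [pvALoop_chunkRun f (xs.take 10) (by simp) i acc hi]
        have hlen10 : (xs.take 10).length = 10 := by simp; omega
        rw [hlen10]
        have hdropne : xs.drop 10 ≠ [] := by
          rw [Ne, List.drop_eq_nil_iff]; omega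
        rw [ih (xs.drop 10) (by simp; omega) (i + 10) _ (by omega)]
        rw [pvChunks10_big (xs.map f) (by simpa using hsmall)]
        rw [List.map_cons,
          intercalate_cons_of_ne_nil _ _ _ (by
            simp only [ne_eq, List.map_eq_nil_iff]
            rw [← List.map_drop]
            exact pvChunks10_ne_nil _ (by simpa using hdropne))]
        have htke : (xs.take 10 ≠ []) := by
          rw [Ne, List.take_eq_nil_iff]
          simp only [not_or]
          exact ⟨by omega, by intro h; subst h; simp at hsmall⟩
        have hxne : xs ≠ [] := by intro h; subst h; simp at hsmall
        simp [htke, hdropne, hxne, List.map_take, List.map_drop, List.append_assoc]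

-- ===== VERDICT (by name: the statement is the Claim_ definition above) =====
theorem create_comparison_display_spec : Claim_equal_create_comparison_display := by
  intro predicted actual _
  unfold Spec_create_comparison_display create_comparison_display create_comparison_display_alt pvBlock
  simp only []
  rw [pvALoop_chunks _ predicted.length predicted le_rfl 0 _ (by norm_num),
      pvALoop_chunks _ actual.length actual le_rfl 0 _ (by norm_num)]
  simp [List.append_assoc]
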